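-- pv_equiv track=rewrite | github.com/IEK-5/PV-GRIP | pvgrip/osm/tasks.py | order_dict_by_list
-- ===== SOURCE A (Python) =====
-- from collections import defaultdict, OrderedDict
-- from typing import List, Dict, Tuple, Any, TypeVar
--
-- def order_dict_by_list(to_order:Dict, order_by:List) -> List[Tuple[Any, Any]]:
--     """
--         Read the contents of "json_dict_path" to a dict and order the keys in the dict according to the keys in "keys".
--         The rest is put back in the same order.
--
--         Example:
--             to_order = {1:"1", "3":3, "2":"2", "foo":"foo", "bar": "bar"}, keys = [1, foo, bar]
--             result {1:"1", "foo":"foo", "bar": "bar", "3":3, "2":"2"}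
--
--         args:
--             to_order (Dict[K, Any]): python dict
--             keys (List[K]): list of keys used to order the dict
--
--         return: path to a file with the new json dict in the form of a list of keys and values
--         """
--     old_keys = list(order_by)
--
--     out = OrderedDict()
--     for k in order_by:
--         if k in old_keys and k in to_order.keys():
--             out[k] = to_order.pop(k)
--
--     out.update(to_order)
--     out = [(k, v) for (k, v) in out.items()]
--     return out
-- ===== SOURCE B (Python) =====
-- def order_dict_by_list(to_order, order_by):
--     # Rank-and-sort: each order_by key gets its first position as rank; items whose
--     # key has no rank get len(order_by) + original position, so one stable sort by a
--     # single integer rank yields matched items in order_by order followed by the rest.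
--     pos = {}
--     for i, k in enumerate(order_by):
--         pos.setdefault(k, i)
--     n = len(order_by)
--     ranked = sorted(enumerate(to_order.items()), key=lambda t: pos.get(t[1][0], n + t[0]))
--     return [kv for _, kv in ranked]
-- ===== Notes on version B (the rewrite author's own statement) =====
-- stated objective: faster
-- what changed: Replaces A's pop-and-rebuild loop over order_by (with its O(m) 'k in old_keys' list scan per iteration) by building a first-position index of order_by once and doing a single stable sort of the dict items under an integer rank (position in order_by for matched keys, len(order_by)+original position for the rest); B is pure, A also mutates to_order (the equivalence is about the return value); Pre_ excludes association lists with duplicate keys, which represent no Python dict.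
import Mathlib
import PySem

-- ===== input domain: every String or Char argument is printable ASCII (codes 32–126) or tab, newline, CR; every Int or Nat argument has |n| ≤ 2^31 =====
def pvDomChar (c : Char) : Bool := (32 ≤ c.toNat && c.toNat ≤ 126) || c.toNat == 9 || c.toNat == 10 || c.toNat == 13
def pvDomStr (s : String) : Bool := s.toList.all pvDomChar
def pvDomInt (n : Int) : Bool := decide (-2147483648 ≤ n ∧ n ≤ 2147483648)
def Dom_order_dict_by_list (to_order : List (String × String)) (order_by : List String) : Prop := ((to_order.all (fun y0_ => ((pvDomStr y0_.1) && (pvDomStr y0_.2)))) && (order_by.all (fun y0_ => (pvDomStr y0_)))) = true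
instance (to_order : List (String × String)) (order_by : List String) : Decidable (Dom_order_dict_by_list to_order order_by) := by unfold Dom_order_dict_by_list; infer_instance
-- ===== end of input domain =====

-- B replaces A's pop-loop over order_by by a single stable sort of the items under an
-- integer rank (first position in order_by, or len(order_by)+position for unmatched keys);
-- A mutates its to_order dict (pops matched keys), B is pure: the equivalence proved here
-- is about the RETURN value only.

-- ===== PORT A =====
def order_dict_by_list (to_order : List (String × String)) (order_by : List String) : List (String × String) :=
  let old_keys := order_by
  let st := order_by.foldl
    (fun (st : PySem.Dict String String × PySem.Dict String String) k =>
      if old_keys.contains k && st.2.contains k then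
        match st.2.pop? k with
        | some (v, rem) => (st.1.insert k v, rem)
        | none => st          -- unreachable: guarded by st.2.contains k
      else st)
    (PySem.Dict.empty, PySem.Dict.mk to_order)
  let out := st.1.update st.2.items
  out.items.map (fun kv => (kv.1, kv.2))

-- ===== PORT B =====
def order_dict_by_list_alt (to_order : List (String × String)) (order_by : List String) : List (String × String) :=
  let pos : PySem.Dict String Int :=
    (PySem.List.enumerate order_by).foldl (fun d p => d.setdefault p.2 p.1) PySem.Dict.empty
  let n : Int := order_by.length
  let ranked := PySem.List.sorted (PySem.List.enumerate to_order)
    (fun t => pos.getD t.2.1 (n + t.1))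
  ranked.map (·.2)

-- ===== PRECONDITION & SPEC =====
-- Pre_ excludes association lists with duplicate keys: they represent no Python dict
-- (A's parameter to_order IS a dict, whose keys are necessarily distinct).
def Pre_order_dict_by_list (to_order : List (String × String)) (order_by : List String) : Prop :=
  (to_order.map Prod.fst).Nodup
instance (to_order : List (String × String)) (order_by : List String) : Decidable (Pre_order_dict_by_list to_order order_by) := by unfold Pre_order_dict_by_list; infer_instance
def pvWitness_order_dict_by_list : (List (String × String)) × List String :=
  ([("a", "1"), ("b", "2"), ("c", "3")], ["c", "x", "a", "c"])

def Spec_order_dict_by_list (to_order : List (String × String)) (order_by : List String) (out : List (String × String)) : Prop := out = order_dict_by_list_alt to_order order_by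
instance (to_order : List (String × String)) (order_by : List String) (out : List (String × String)) : Decidable (Spec_order_dict_by_list to_order order_by out) := by unfold Spec_order_dict_by_list; infer_instance

-- ===== CLAIM (what is proved, stated in full; the proofs are below) =====
def Claim_equal_order_dict_by_list : Prop := ∀ (to_order : List (String × String)) (order_by : List String), Dom_order_dict_by_list to_order order_by → Pre_order_dict_by_list to_order order_by → Spec_order_dict_by_list to_order order_by (order_dict_by_list to_order order_by)

-- ===== LEMMAS AND PROOFS =====

-- proof-side helpers
def pvSel (l : List String) (K : List String) : List String :=
  match l with
  | [] => []
  | k :: l' => if K.contains k then k :: pvSel l' (K.filter (fun x => !(x == k))) else pvSel l' K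

def pvVal (to_order : List (String × String)) (k : String) : String :=
  ((to_order.find? (fun p => p.1 == k)).map (·.2)).getD ""

def pvG (to_order : List (String × String)) (k : String) : Int × (String × String) :=
  (((to_order.map Prod.fst).idxOf k : Int), (k, pvVal to_order k))

lemma pvIdxOf_cons_ne (k x : String) (l : List String) (h : x ≠ k) :
    (k :: l).idxOf x = l.idxOf x + 1 := by
  have : (k == x) = false := by simp [Ne.symm h]
  simp [List.idxOf_cons, this]

lemma pvSel_mem (l K : List String) (x : String) : x ∈ pvSel l K ↔ x ∈ l ∧ x ∈ K := by
  induction l generalizing K with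
  | nil => simp [pvSel]
  | cons k l' ih =>
    by_cases hk : K.contains k
    · simp only [pvSel, if_pos hk, List.mem_cons, ih]
      by_cases hx : x = k
      · subst hx; simp [List.contains_iff_mem.mp hk]
      · simp only [List.mem_filter]
        constructor
        · rintro (rfl | ⟨h1, h2, _⟩)
          · exact absurd rfl hx
          · exact ⟨Or.inr h1, h2⟩
        · rintro ⟨rfl | h1, h2⟩
          · exact absurd rfl hx
          · exact Or.inr ⟨h1, h2, by simp [hx]⟩
    · simp only [pvSel, if_neg hk, List.mem_cons, ih]
      constructor
      · rintro ⟨h1, h2⟩; exact ⟨Or.inr h1, h2⟩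
      · rintro ⟨rfl | h1, h2⟩
        · exact absurd (List.contains_iff_mem.mpr h2) hk
        · exact ⟨h1, h2⟩

lemma pvSel_ne_of_mem_filter (l' : List String) (K : List String) (k b : String)
    (hb : b ∈ pvSel l' (K.filter (fun x => !(x == k)))) : b ≠ k := by
  have := ((pvSel_mem _ _ _).mp hb).2
  simp only [List.mem_filter, Bool.not_eq_eq_eq_not, Bool.not_true, beq_eq_false_iff_ne] at this
  exact this.2

lemma pvSel_pairwise (l K : List String) :
    (pvSel l K).Pairwise (fun a b => l.idxOf a < l.idxOf b) := by
  induction l generalizing K with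
  | nil => simp [pvSel]
  | cons k l' ih =>
    by_cases hk : K.contains k
    · simp only [pvSel, if_pos hk]
      constructor
      · intro b hb
        rw [pvIdxOf_cons_ne k b l' (pvSel_ne_of_mem_filter l' K k b hb)]
        simp
      · apply ((ih _).imp_of_mem)
        intro a b ha hb hab
        rw [pvIdxOf_cons_ne k a l' (pvSel_ne_of_mem_filter l' K k a ha),
            pvIdxOf_cons_ne k b l' (pvSel_ne_of_mem_filter l' K k b hb)]
        omega
    · simp only [pvSel, if_neg hk]
      apply ((ih K).imp_of_mem)
      intro a b ha hb hab
      have hak : a ≠ k := by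
        rintro rfl; exact hk (List.contains_iff_mem.mpr ((pvSel_mem _ _ _).mp ha).2)
      have hbk : b ≠ k := by
        rintro rfl; exact hk (List.contains_iff_mem.mpr ((pvSel_mem _ _ _).mp hb).2)
      rw [pvIdxOf_cons_ne k a l' hak, pvIdxOf_cons_ne k b l' hbk]; omega

lemma pvSel_nodup (l K : List String) : (pvSel l K).Nodup :=
  (pvSel_pairwise l K).imp (fun h => by intro he; subst he; omega)

lemma pvFindFilter (l : List (String × String)) (k k' : String) (h : k' ≠ k) :
    (l.filter (fun p => !(p.1 == k))).find? (fun p => p.1 == k')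
      = l.find? (fun p => p.1 == k') := by
  induction l with
  | nil => rfl
  | cons p l ih =>
    by_cases hk : p.1 = k
    · have h1 : (!(p.1 == k)) = false := by simp [hk]
      have h2 : (p.1 == k') = false := by simp [hk, Ne.symm h]
      simp [h1, h2, ih]
    · have h1 : (!(p.1 == k)) = true := by simp [hk]
      simp only [List.filter_cons, h1, List.find?_cons]
      by_cases h2 : p.1 = k'
      · have h2' : (p.1 == k') = true := by simp [h2]
        simp [h2']
      · have h2' : (p.1 == k') = false := by simp [h2]
        simp [h2', ih]

lemma pvErase_get?_ne (d : PySem.Dict String String) (k k' : String) (h : k' ≠ k) :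
    (d.erase k).get? k' = d.get? k' := by
  simp only [PySem.Dict.erase, PySem.Dict.get?, pvFindFilter d.1 k k' h]

lemma pvAnyFilter (l : List (String × String)) (k k' : String) (h : ¬ k' = k) :
    (l.filter (fun p => !(p.1 == k))).any (fun p => p.1 == k')
      = l.any (fun p => p.1 == k') := by
  induction l with
  | nil => rfl
  | cons p l ih =>
    by_cases hk : p.1 = k
    · have h1 : (!(p.1 == k)) = false := by simp [hk]
      have h2 : (p.1 == k') = false := by simp [hk, Ne.symm h]
      simp [h1, h2, ih]
    · have h1 : (!(p.1 == k)) = true := by simp [hk]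
      simp [h1, List.any_cons, ih]

lemma pvErase_contains (d : PySem.Dict String String) (k k' : String) :
    (d.erase k).contains k' = ((!(k' == k)) && d.contains k') := by
  simp only [PySem.Dict.erase, PySem.Dict.contains]
  by_cases h : k' = k
  · subst h; simp only [BEq.rfl, Bool.not_true, Bool.false_and]
    rw [List.any_eq_false]
    intro p hp
    simp only [List.mem_filter] at hp
    simpa using hp.2
  · have hb : (k' == k) = false := by simp [h]
    simp only [hb, Bool.not_false, Bool.true_and]
    exact pvAnyFilter d.1 k k' h

lemma pvErase_keys (d : PySem.Dict String String) (k : String) :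
    (d.erase k).keys = d.keys.filter (fun x => !(x == k)) := by
  simp only [PySem.Dict.erase, PySem.Dict.keys, List.filter_map]
  rfl

lemma pvKeysContains (rem : PySem.Dict String String) (k : String) :
    rem.keys.contains k = rem.contains k := by
  by_cases h : rem.contains k = true
  · rw [h, List.contains_iff_mem]
    exact (PySem.Dict.contains_iff_mem_keys rem k).mp h
  · rw [Bool.not_eq_true] at h
    rw [h]
    rw [← Bool.not_eq_true, List.contains_iff_mem]
    intro hm
    rw [(PySem.Dict.contains_iff_mem_keys rem k).mpr hm] at h
    exact absurd h (by simp)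

lemma pvLoopA (l ob : List String) (out rem : PySem.Dict String String)
    (hsub : ∀ k ∈ l, ob.contains k = true)
    (hdis : ∀ k, out.contains k = true → rem.contains k = false) :
    l.foldl
      (fun (st : PySem.Dict String String × PySem.Dict String String) k =>
        if ob.contains k && st.2.contains k then
          match st.2.pop? k with
          | some (v, rem) => (st.1.insert k v, rem)
          | none => st
        else st) (out, rem)
    = (PySem.Dict.mk (out.items ++ (pvSel l rem.keys).map (fun k => (k, rem.getD k ""))),
       PySem.Dict.mk (rem.items.filter (fun p => !(l.contains p.1)))) := by
  induction l generalizing out rem with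
  | nil => simp [pvSel]
  | cons k l' ih =>
    have hob : ob.contains k = true := hsub k (List.mem_cons_self)
    simp only [List.foldl_cons, hob, Bool.true_and]
    by_cases hc : rem.contains k = true
    · -- popped
      obtain ⟨v, hv⟩ : ∃ v, rem.get? k = some v := by
        rw [PySem.Dict.contains_eq_isSome_get?] at hc
        exact Option.isSome_iff_exists.mp hc
      have hpop : rem.pop? k = some (v, rem.erase k) := by
        simp [PySem.Dict.pop?, hv]
      rw [if_pos hc, hpop]
      have hout : out.contains k = false := by
        by_cases h : out.contains k = true
        · rw [hdis k h] at hc; exact absurd hc (by simp)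
        · simpa using h
      have hins : (out.insert k v).items = out.items ++ [(k, v)] :=
        PySem.Dict.items_insert_of_not_contains out v hout
      have hdis' : ∀ k', (out.insert k v).contains k' = true → (rem.erase k).contains k' = false := by
        intro k' h'
        rw [PySem.Dict.contains_insert] at h'
        rw [pvErase_contains]
        by_cases he : k' = k
        · simp [he]
        · have : out.contains k' = true := by
            rcases Bool.or_eq_true_iff.mp h' with h1 | h1
            · exact absurd (by simpa using h1) he
            · exact h1
          simp [hdis k' this]
      rw [ih (out.insert k v) (rem.erase k) (fun x hx => hsub x (List.mem_cons_of_mem _ hx)) hdis']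
      have hkc : rem.keys.contains k = true := by rw [pvKeysContains]; exact hc
      refine Prod.ext ?_ ?_
      · simp only
        congr 1
        rw [hins, pvSel, if_pos hkc, pvErase_keys, PySem.Dict.keys]
        simp only [List.map_cons, List.append_assoc, List.singleton_append]
        congr 1
        congr 1
        · simp [PySem.Dict.getD, hv]
        · apply List.map_congr_left
          intro x hx
          have hxk : x ≠ k := by
            have hmem := ((pvSel_mem _ _ _).mp hx).2
            simp only [List.mem_filter, Bool.not_eq_eq_eq_not, Bool.not_true, beq_eq_false_iff_ne] at hmem
            exact hmem.2
          simp only [PySem.Dict.getD, pvErase_get?_ne rem k x hxk]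
      · simp only
        congr 1
        rw [PySem.Dict.erase]
        simp only [List.filter_filter]
        apply List.filter_congr
        intro p _
        simp only [List.contains_cons]
        by_cases hp : p.1 = k
        · simp [hp]
        · simp [Bool.and_comm]
    · -- skipped
      rw [if_neg (by simpa using hc)]
      rw [ih out rem (fun x hx => hsub x (List.mem_cons_of_mem _ hx)) hdis]
      have hkc : rem.keys.contains k = false := by rw [pvKeysContains]; simpa using hc
      refine Prod.ext ?_ ?_
      · simp only
        rw [pvSel, if_neg (by rw [hkc]; simp)]
      · simp only
        congr 1
        apply List.filter_congr
        intro p hp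
        have hpk : p.1 ≠ k := by
          intro he
          have : rem.contains k = true := by
            rw [← he]
            exact List.any_eq_true.mpr ⟨p, hp, by simp⟩
          exact hc this
        simp only [List.contains_cons]
        simp [hpk]

lemma pvPos_get (l : List String) (k : String) (d : PySem.Dict String Int) (s : Int) :
    ((PySem.List.enumerate l s).foldl (fun d p => d.setdefault p.2 p.1) d).get? k
      = if d.contains k then d.get? k
        else if l.contains k then some (s + (l.idxOf k : Int)) else none := by
  induction l generalizing d s with
  | nil =>
    simp only [PySem.List.enumerate, List.foldl_nil, List.contains_nil]
    split
    · rfl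
    · simp_all [PySem.Dict.get?_eq_none_iff_contains]
  | cons x l' ih =>
    rw [PySem.List.enumerate_cons]
    simp only [List.foldl_cons, ih]
    by_cases hd : d.contains k
    · have h2 : (d.setdefault x s).contains k = true := by
        by_cases hx : d.contains x
        · rw [PySem.Dict.setdefault_of_contains d s hx]; exact hd
        · rw [PySem.Dict.setdefault_of_not_contains d s (by simpa using hx)]
          simp [PySem.Dict.contains_insert, hd]
      simp only [if_pos hd, if_pos h2]
      by_cases hx : d.contains x
      · rw [PySem.Dict.setdefault_of_contains d s hx]
      · rw [PySem.Dict.setdefault_of_not_contains d s (by simpa using hx)]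
        have hne : k ≠ x := by rintro rfl; exact hx hd
        exact PySem.Dict.get?_insert_of_ne d s hne
    · by_cases hkx : k = x
      · subst hkx
        rw [PySem.Dict.setdefault_of_not_contains d s (by simpa using hd)]
        simp [hd, PySem.Dict.contains_insert_self, PySem.Dict.get?_insert_self]
      · have hcs : (d.setdefault x s).contains k = d.contains k := by
          by_cases hx : d.contains x
          · rw [PySem.Dict.setdefault_of_contains d s hx]
          · rw [PySem.Dict.setdefault_of_not_contains d s (by simpa using hx)]
            simp [PySem.Dict.contains_insert, hkx, hd]
        have hxk : (x == k) = false := by simp [Ne.symm hkx]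
        simp only [hcs, if_neg hd, List.contains_cons, 
          List.idxOf_cons, hxk, cond_false]
        have hkx2 : (k == x) = false := by simp [hkx]
        simp only [hkx2, Bool.false_or]
        split
        · congr 1; push_cast; ring
        · rfl

lemma pvFind_key (to_order : List (String × String)) (hnd : (to_order.map Prod.fst).Nodup)
    (i : Nat) (h : i < to_order.length) :
    to_order.find? (fun p => p.1 == to_order[i].1) = some to_order[i] := by
  induction to_order generalizing i with
  | nil => simp at h
  | cons p rest ih =>
    rcases i with _ | j
    · simp
    · have hj : j < rest.length := by simpa using h
      have hnd' : (rest.map Prod.fst).Nodup := by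
        simp only [List.map_cons, List.nodup_cons] at hnd; exact hnd.2
      have hne : p.1 ≠ rest[j].1 := by
        simp only [List.map_cons, List.nodup_cons] at hnd
        intro he
        exact hnd.1 (he ▸ List.mem_map_of_mem (List.getElem_mem hj))
      have hb : (p.1 == (rest[j]).1) = false := by simpa using hne
      simp only [List.getElem_cons_succ, List.find?_cons, hb]
      exact ih hnd' j hj

lemma pvEnum_eq (to_order : List (String × String)) (hnd : (to_order.map Prod.fst).Nodup) :
    PySem.List.enumerate to_order = (to_order.map Prod.fst).map (pvG to_order) := by
  apply List.ext_getElem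
  · simp [PySem.List.length_enumerate]
  · intro i h1 h2
    have hi : i < to_order.length := by simpa [PySem.List.length_enumerate] using h1
    rw [PySem.List.getElem_enumerate]
    simp only [List.getElem_map]
    unfold pvG
    refine Prod.ext ?_ ?_
    · simp only
      have := List.Nodup.idxOf_getElem hnd i (by simpa using hi)
      simp only [List.getElem_map] at this
      rw [show (to_order.map Prod.fst).idxOf to_order[i].1 = i by simpa using this]
      simp
    · simp only [pvVal]
      rw [pvFind_key to_order hnd i hi]
      simp

lemma pvMapSnd_filter (q : String × String → Bool) (xs : List (String × String)) (s : Int) :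
    ((PySem.List.enumerate xs s).filter (fun t => q t.2)).map (·.2) = xs.filter q := by
  induction xs generalizing s with
  | nil => simp [PySem.List.enumerate]
  | cons x xs ih =>
    rw [PySem.List.enumerate_cons]
    by_cases hq : q x <;> simp [hq, ih]

lemma pvA_char (to_order : List (String × String)) (order_by : List String)
    (hnd : (to_order.map Prod.fst).Nodup) :
    order_dict_by_list to_order order_by
      = (pvSel order_by (to_order.map Prod.fst)).map (fun k => (k, pvVal to_order k))
        ++ to_order.filter (fun p => !(order_by.contains p.1)) := by
  dsimp only [order_dict_by_list]
  rw [pvLoopA order_by order_by PySem.Dict.empty (PySem.Dict.mk to_order)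
      (fun k hk => List.contains_iff_mem.mpr hk)
      (fun k h => by simp [PySem.Dict.contains_empty] at h)]
  simp only [PySem.Dict.empty, PySem.Dict.update]
  set M := (pvSel order_by ((PySem.Dict.mk to_order).keys)).map
      (fun k => (k, (PySem.Dict.mk to_order).getD k "")) with hM
  set R := to_order.filter (fun p => !(order_by.contains p.1)) with hR
  have hkeys : (PySem.Dict.mk to_order).keys = to_order.map Prod.fst := rfl
  have hfresh : ∀ p ∈ R, (PySem.Dict.mk ([] ++ M)).contains p.1 = false := by
    intro p hp
    rw [Bool.eq_false_iff]
    intro hcon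
    simp only [PySem.Dict.contains, List.nil_append, List.any_eq_true] at hcon
    obtain ⟨q, hq, hq2⟩ := hcon
    rw [hM] at hq
    obtain ⟨x, hx, rfl⟩ := List.mem_map.mp hq
    have hxo : x ∈ order_by := ((pvSel_mem _ _ _).mp hx).1
    have hxp : x = p.1 := by simpa using hq2
    have hmem : (!order_by.contains p.1) = true := (List.mem_filter.mp hp).2
    rw [← hxp, List.contains_iff_mem.mpr hxo] at hmem
    simp at hmem
  have hndR : (R.map Prod.fst).Nodup := by
    have hrw : R.map Prod.fst = (to_order.map Prod.fst).filter (fun x => !(order_by.contains x)) := by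
      rw [hR, List.filter_map]; rfl
    rw [hrw]
    exact hnd.filter _
  rw [PySem.Dict.items_foldl_insert_fresh (k := Prod.fst) (v := Prod.snd) R
      (d := PySem.Dict.mk ([] ++ M)) hfresh hndR]
  simp only [List.nil_append, List.map_append, List.map_map]
  congr 1
  · rw [hM, hkeys, List.map_map]
    rfl
  · simp [Function.comp_def]

lemma pvB_char (to_order : List (String × String)) (order_by : List String)
    (hnd : (to_order.map Prod.fst).Nodup) :
    order_dict_by_list_alt to_order order_by
      = (pvSel order_by (to_order.map Prod.fst)).map (fun k => (k, pvVal to_order k))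
        ++ to_order.filter (fun p => !(order_by.contains p.1)) := by
  dsimp only [order_dict_by_list_alt]
  set K := to_order.map Prod.fst with hK
  set pos := (PySem.List.enumerate order_by).foldl (fun d p => d.setdefault p.2 p.1)
      (PySem.Dict.empty : PySem.Dict String Int) with hpos
  set n : Int := (order_by.length : Int) with hn
  set key : Int × (String × String) → Int := fun t => pos.getD t.2.1 (n + t.1) with hkey
  have hposget : ∀ k : String, pos.get? k
      = if order_by.contains k then some ((order_by.idxOf k : Int)) else none := by
    intro k
    rw [hpos, pvPos_get]
    simp [PySem.Dict.contains_empty]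
  -- key value on matched / unmatched
  have hkeyM : ∀ k ∈ pvSel order_by K, ∀ t : Int × (String × String), t.2.1 = k →
      key t = (order_by.idxOf k : Int) := by
    intro k hk t ht
    have hko : k ∈ order_by := ((pvSel_mem _ _ _).mp hk).1
    rw [hkey]
    simp only [ht, PySem.Dict.getD, hposget k, List.contains_iff_mem.mpr hko]
    rfl
  have hkeyR : ∀ t : Int × (String × String), (order_by.contains t.2.1) = false →
      key t = n + t.1 := by
    intro t ht
    rw [hkey]
    simp only [PySem.Dict.getD, hposget t.2.1, ht]
    rfl
  -- the canonical sorted list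
  set Mke := (pvSel order_by K).map (pvG to_order) with hMke
  set Re := (PySem.List.enumerate to_order).filter
      (fun t => !(order_by.contains t.2.1)) with hRe
  have hperm : (Mke ++ Re).Perm (PySem.List.enumerate to_order) := by
    have h1 : (pvSel order_by K).Perm (K.filter (fun x => order_by.contains x)) := by
      apply (List.perm_ext_iff_of_nodup (pvSel_nodup _ _) (hnd.filter _)).mpr
      intro x
      rw [pvSel_mem, List.mem_filter]
      constructor
      · rintro ⟨h1, h2⟩; exact ⟨h2, List.contains_iff_mem.mpr h1⟩
      · rintro ⟨h1, h2⟩; exact ⟨List.contains_iff_mem.mp h2, h1⟩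
    have h2 : (PySem.List.enumerate to_order).filter (fun t => order_by.contains t.2.1)
        = (K.filter (fun x => order_by.contains x)).map (pvG to_order) := by
      rw [pvEnum_eq to_order hnd, List.filter_map]
      rfl
    have h3 := List.filter_append_perm (fun t => order_by.contains t.2.1)
        (PySem.List.enumerate to_order)
    rw [h2] at h3
    exact ((h1.map (pvG to_order)).append_right Re).trans h3
  have hpair : (Mke ++ Re).Pairwise (fun a b => key a < key b) := by
    rw [List.pairwise_append]
    refine ⟨?_, ?_, ?_⟩
    · rw [hMke, List.pairwise_map]
      apply (pvSel_pairwise order_by K).imp_of_mem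
      intro a b ha hb hab
      rw [hkeyM a ha (pvG to_order a) rfl, hkeyM b hb (pvG to_order b) rfl]
      exact_mod_cast hab
    · have h4 : Re.Pairwise (fun a b => a.1 < b.1) := by
        apply List.Pairwise.sublist List.filter_sublist
        exact PySem.List.pairwise_lt_enumerate to_order 0
      apply h4.imp_of_mem
      intro a b ha hb hab
      have hca : (order_by.contains a.2.1) = false := by
        have := (List.mem_filter.mp ha).2; simpa using this
      have hcb : (order_by.contains b.2.1) = false := by
        have := (List.mem_filter.mp hb).2; simpa using this
      rw [hkeyR a hca, hkeyR b hcb]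
      omega
    · intro a ha b hb
      rw [hMke] at ha
      obtain ⟨k, hk, rfl⟩ := List.mem_map.mp ha
      have hko : k ∈ order_by := ((pvSel_mem _ _ _).mp hk).1
      have hcb : (order_by.contains b.2.1) = false := by
        have := (List.mem_filter.mp hb).2; simpa using this
      rw [hkeyM k hk (pvG to_order k) rfl, hkeyR b hcb]
      have hlt : order_by.idxOf k < order_by.length := List.idxOf_lt_length_of_mem hko
      have hb0 : 0 ≤ b.1 := by
        have hbe : b ∈ PySem.List.enumerate to_order := List.mem_of_mem_filter hb
        obtain ⟨j, hj, rfl⟩ := (PySem.List.mem_enumerate_iff _ _ _).mp hbe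
        simp
      rw [hn]
      omega
  have hsorted := PySem.List.sorted_eq_of_perm_of_pairwise_lt
    (PySem.List.enumerate to_order) (Mke ++ Re) key hperm hpair
  rw [hsorted, List.map_append]
  congr 1
  · rw [hMke, List.map_map]
    rfl
  · exact pvMapSnd_filter (fun p => !(order_by.contains p.1)) to_order 0

-- ===== VERDICT (by name: the statement is the Claim_ definition above) =====
theorem order_dict_by_list_spec : Claim_equal_order_dict_by_list := by
  intro to_order order_by _ hpre
  unfold Spec_order_dict_by_list
  rw [pvA_char to_order order_by hpre, pvB_char to_order order_by hpre]
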